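-- pv_equiv track=rewrite | github.com/TsvetaKandilarova/Programming101 | week0/Bonus Round 2/solution.py | magic_string
-- ===== SOURCE A (Python) =====
-- def magic_string(string):
--
--     count_ = 0
--
--     for i in range (int(len(string) / 2)):
--         if string[i] == '<':
--             count_ += 1
--         if string[len(string) - 1 - i] == '>':
--             count_ += 1
--
--     return count_
-- ===== SOURCE B (Python) =====
-- def magic_string(string):
--     n = len(string)
--     front_end = n // 2
--     back_start = n - n // 2
--     return sum(1 for i, c in enumerate(string)
--                if (c == '<' and i < front_end) or (c == '>' and i >= back_start))
-- ===== Notes on version B (the rewrite author's own statement) =====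
-- stated objective: alternative
-- what changed: Replaces A's half-length loop that touches two mirrored positions (i and n-1-i) per iteration with one full linear scan over enumerate(string), classifying each character by a positional region predicate.
import Mathlib
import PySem

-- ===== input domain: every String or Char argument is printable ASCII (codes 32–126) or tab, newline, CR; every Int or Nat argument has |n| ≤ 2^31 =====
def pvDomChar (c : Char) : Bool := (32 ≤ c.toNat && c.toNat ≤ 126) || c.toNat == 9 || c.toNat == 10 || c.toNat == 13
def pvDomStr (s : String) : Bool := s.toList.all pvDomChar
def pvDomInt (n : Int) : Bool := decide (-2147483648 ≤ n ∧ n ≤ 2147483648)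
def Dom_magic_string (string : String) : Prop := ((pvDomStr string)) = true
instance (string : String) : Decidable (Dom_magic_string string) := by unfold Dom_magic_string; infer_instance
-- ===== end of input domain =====

-- B replaces A's half-length loop touching two mirrored positions per iteration with one
-- full linear scan over enumerate(string), classifying each character by a region predicate.

-- ===== PORT A =====
-- 'int(len(string) / 2)' is ported as Nat halving: exact for these (nonnegative) lengths.
def magic_string (string : String) : Int :=
  let s := string.toList
  let n := s.length
  (PySem.List.pyRange 0 ((n / 2 : Nat) : Int) 1).foldl
    (fun count_ i =>
      let count_ := if PySem.List.pyGetD s i ' ' = '<' then count_ + 1 else count_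
      if PySem.List.pyGetD s ((n : Int) - 1 - i) ' ' = '>' then count_ + 1 else count_)
    0

-- ===== PORT B =====
def magic_string_alt (string : String) : Int :=
  let s := string.toList
  let n : Int := s.length
  let front_end := PySem.Int.floordiv n 2
  let back_start := n - PySem.Int.floordiv n 2
  (PySem.List.enumerate s 0).foldl
    (fun total ic =>
      if (ic.2 = '<' ∧ ic.1 < front_end) ∨ (ic.2 = '>' ∧ back_start ≤ ic.1)
      then total + 1 else total)
    0

-- ===== PRECONDITION & SPEC =====
def Spec_magic_string (string : String) (out : Int) : Prop := out = magic_string_alt string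
instance (string : String) (out : Int) : Decidable (Spec_magic_string string out) := by unfold Spec_magic_string; infer_instance

-- ===== CLAIM (what is proved, stated in full; the proofs are below) =====
def Claim_equal_magic_string : Prop := ∀ (string : String), Dom_magic_string string → Spec_magic_string string (magic_string string)

-- ===== LEMMAS AND PROOFS =====

-- A's loop invariant: after k iterations, the accumulator holds the counts over the
-- first k and last k positions.
theorem magic_loop_eq (l : List Char) (k : Nat) (hk : k ≤ l.length) (acc : Int) :
    (PySem.List.pyRange 0 ((k : Nat) : Int) 1).foldl
      (fun count_ i =>
        let count_ := if PySem.List.pyGetD l i ' ' = '<' then count_ + 1 else count_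
        if PySem.List.pyGetD l ((l.length : Int) - 1 - i) ' ' = '>' then count_ + 1 else count_)
      acc
    = acc + ((l.take k).count '<' : Int) + ((l.drop (l.length - k)).count '>' : Int) := by
  induction k generalizing acc with
  | zero => simp [PySem.List.pyRange]
  | succ k ih =>
    have hk' : k ≤ l.length := Nat.le_of_succ_le hk
    have hklt : k < l.length := Nat.lt_of_succ_le hk
    have hrange : PySem.List.pyRange 0 ((k + 1 : Nat) : Int) 1
        = PySem.List.pyRange 0 ((k : Nat) : Int) 1 ++ [((k : Nat) : Int)] := by
      have := PySem.List.pyRange_one_succ_right (a := 0) (b := ((k : Nat) : Int)) (by positivity)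
      simpa using this
    rw [hrange, List.foldl_append, ih hk']
    simp only [List.foldl_cons, List.foldl_nil]
    have hfront : PySem.List.pyGetD l ((k : Nat) : Int) ' ' = l[k] := by
      simp [List.getD_eq_getElem?_getD, List.getElem?_eq_getElem hklt]
    have hbackidx : ((l.length : Int) - 1 - (k : Nat)) = ((l.length - 1 - k : Nat) : Int) := by
      omega
    have hbacklt : l.length - 1 - k < l.length := by omega
    have hback : PySem.List.pyGetD l ((l.length : Int) - 1 - (k : Nat)) ' '
        = l[l.length - 1 - k] := by
      rw [hbackidx]
      simp [List.getD_eq_getElem?_getD, List.getElem?_eq_getElem hbacklt]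
    have htake : l.take (k + 1) = l.take k ++ [l[k]] := by
      rw [List.take_add_one]
      simp [List.getElem?_eq_getElem hklt]
    have hdropidx : l.length - (k + 1) = l.length - 1 - k := by omega
    have hdrop : l.drop (l.length - (k + 1))
        = l[l.length - 1 - k] :: l.drop (l.length - k) := by
      rw [hdropidx, List.drop_eq_getElem_cons hbacklt]
      have h1 : l.length - 1 - k + 1 = l.length - k := by omega
      rw [h1]
    rw [hfront, hback, htake, hdrop]
    simp only [List.count_append, List.count_cons]
    by_cases h1 : l[k] = '<' <;> by_cases h2 : l[l.length - 1 - k] = '>' <;>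
      simp [h1, h2] <;> ring

-- B's scan invariant: folding over the enumeration starting at index j counts the
-- '<'s at positions below h and the '>'s at positions at or above b.
theorem enum_fold_eq (l : List Char) (h b : Nat) (j : Nat) (acc : Int) :
    (PySem.List.enumerate l ((j : Nat) : Int)).foldl
      (fun total ic =>
        if (ic.2 = '<' ∧ ic.1 < ((h : Nat) : Int)) ∨ (ic.2 = '>' ∧ ((b : Nat) : Int) ≤ ic.1)
        then total + 1 else total)
      acc
    = acc + ((l.take (h - j)).count '<' : Int) + ((l.drop (b - j)).count '>' : Int) := by
  induction l generalizing j acc with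
  | nil => simp [PySem.List.enumerate]
  | cons x t ih =>
    rw [PySem.List.enumerate_cons, List.foldl_cons]
    have hj1 : ((j : Nat) : Int) + 1 = (((j + 1 : Nat)) : Int) := by push_cast; ring
    rw [hj1, ih (j + 1)]
    simp only [Nat.cast_lt, Nat.cast_le]
    -- the head's contribution, split by region
    have hcontrib : (if (x = '<' ∧ j < h) ∨ (x = '>' ∧ b ≤ j) then acc + 1 else acc)
        = acc + (if x = '<' ∧ j < h then 1 else 0) + (if x = '>' ∧ b ≤ j then 1 else 0) := by
      by_cases hx1 : x = '<' <;> by_cases hx2 : x = '>'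
      · exact absurd (hx1 ▸ hx2) (by decide)
      · simp [hx1, hx2] <;> split_ifs <;> ring
      · simp [hx1, hx2] <;> split_ifs <;> ring
      · simp [hx1, hx2] <;> split_ifs <;> ring
    have hfront : (((x :: t).take (h - j)).count '<' : Int)
        = (if x = '<' ∧ j < h then 1 else 0) + ((t.take (h - (j + 1))).count '<' : Int) := by
      by_cases hjh : j < h
      · have : h - j = (h - (j + 1)) + 1 := by omega
        rw [this, List.take_succ_cons]
        by_cases hx : x = '<' <;> simp [List.count_cons, hx, hjh] <;> ring
      · have h1 : h - j = 0 := by omega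
        have h2 : h - (j + 1) = 0 := by omega
        rw [h1, h2, List.take_zero, List.take_zero]
        simp [hjh]
    have hback : (((x :: t).drop (b - j)).count '>' : Int)
        = (if x = '>' ∧ b ≤ j then 1 else 0) + ((t.drop (b - (j + 1))).count '>' : Int) := by
      by_cases hjb : j < b
      · have : b - j = (b - (j + 1)) + 1 := by omega
        rw [this, List.drop_succ_cons]
        have : ¬ b ≤ j := by omega
        simp [this]
      · have h1 : b - j = 0 := by omega
        have h2 : b - (j + 1) = 0 := by omega
        rw [h1, h2, List.drop_zero, List.drop_zero]
        have hbj : b ≤ j := by omega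
        by_cases hx : x = '>' <;> simp [List.count_cons, hx, hbj] <;> ring
    rw [hcontrib, hfront, hback]
    ring

-- ===== VERDICT (by name: the statement is the Claim_ definition above) =====
theorem magic_string_spec : Claim_equal_magic_string := by
  intro s _
  unfold Spec_magic_string magic_string magic_string_alt
  rw [magic_loop_eq s.toList (s.toList.length / 2) (Nat.div_le_self _ _) 0]
  have hfd : PySem.Int.floordiv ((s.toList.length : Int)) 2
      = ((s.toList.length / 2 : Nat) : Int) := by
    rw [PySem.Int.floordiv, Int.fdiv_eq_ediv]
    simp only [show ((0:Int) ≤ 2 ∨ (2:Int) ∣ (s.toList.length : Int)) from Or.inl (by norm_num), if_pos]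
    omega
  have hbs : ((s.toList.length : Int)) - ((s.toList.length / 2 : Nat) : Int)
      = (((s.toList.length - s.toList.length / 2 : Nat)) : Int) := by
    have := Nat.div_le_self s.toList.length 2
    omega
  simp only [hfd, hbs]
  have hB := enum_fold_eq s.toList (s.toList.length / 2)
      (s.toList.length - s.toList.length / 2) 0 0
  simp only [Nat.sub_zero, Nat.cast_zero] at hB
  rw [hB]
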